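-- pv_equiv track=rewrite | github.com/lucasczz/deep-river-demo-23 | Part 2 - Introduction to Deep River/notebooks/utils.py | find_anom_subsequences
-- ===== SOURCE A (Python) =====
-- def find_anom_subsequences(labels):
--     windows = []
--     start = None
--
--     for i, value in enumerate(labels):
--         if value == 1:
--             if start is None:
--                 start = i
--         elif start is not None:
--             end = i - 1
--             windows.append((start, end))
--             start = None
--
--     # If the last window ends with a 1, add it as well
--     if start is not None:
--         windows.append((start, len(labels) - 1))
--
--     return windows
-- ===== SOURCE B (Python) =====
-- def find_anom_subsequences(labels):
--     idx = [i for i, v in enumerate(labels) if v == 1]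
--     if not idx:
--         return []
--     windows = []
--     run_start = prev = idx[0]
--     for j in idx[1:]:
--         if j != prev + 1:
--             windows.append((run_start, prev))
--             run_start = j
--         prev = j
--     windows.append((run_start, prev))
--     return windows
-- ===== Notes on version B (the rewrite author's own statement) =====
-- stated objective: alternative
-- what changed: Replaces the single-pass state machine (Optional start of an open window) with a filter pass collecting the positions of 1s followed by a gap-detection pass grouping maximal consecutive runs of that index list.
import Mathlib
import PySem

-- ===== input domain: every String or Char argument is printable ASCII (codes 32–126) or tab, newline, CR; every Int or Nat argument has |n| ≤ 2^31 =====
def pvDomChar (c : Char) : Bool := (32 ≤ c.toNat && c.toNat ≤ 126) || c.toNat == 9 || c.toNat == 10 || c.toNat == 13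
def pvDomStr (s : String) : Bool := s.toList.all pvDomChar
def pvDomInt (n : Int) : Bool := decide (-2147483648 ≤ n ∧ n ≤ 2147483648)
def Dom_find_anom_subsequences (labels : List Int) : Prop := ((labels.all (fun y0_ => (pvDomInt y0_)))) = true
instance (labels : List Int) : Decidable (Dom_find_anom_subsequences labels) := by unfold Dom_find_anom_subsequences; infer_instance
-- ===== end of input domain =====

-- B replaces A's single-pass Optional-start state machine with a filter pass over positions of 1s
-- followed by a gap-detection grouping pass (objective: alternative decomposition, same cost).


-- ===== PORT A =====
-- the for-loop over enumerate(labels): state = (windows, start), i is the running index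
def pvALoop : List Int → Int → List (Int × Int) → Option Int → List (Int × Int) × Option Int
  | [], _, ws, st => (ws, st)
  | v :: rest, i, ws, st =>
      if v == 1 then
        match st with
        | none => pvALoop rest (i + 1) ws (some i)
        | some s => pvALoop rest (i + 1) ws (some s)
      else
        match st with
        | some s => pvALoop rest (i + 1) (ws ++ [(s, i - 1)]) none
        | none => pvALoop rest (i + 1) ws none

def find_anom_subsequences (labels : List Int) : List (Int × Int) :=
  let r := pvALoop labels 0 [] none
  match r.2 with
  | some s => r.1 ++ [(s, (labels.length : Int) - 1)]
  | none => r.1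

-- ===== PORT B =====
-- idx = [i for i, v in enumerate(labels) if v == 1]
def pvBFilter : List Int → Int → List Int
  | [], _ => []
  | v :: rest, i => if v == 1 then i :: pvBFilter rest (i + 1) else pvBFilter rest (i + 1)

-- the for-loop over idx[1:]: state = (windows, run_start, prev)
def pvBGroup : List Int → Int → Int → List (Int × Int) → List (Int × Int)
  | [], run_start, prev, ws => ws ++ [(run_start, prev)]
  | j :: rest, run_start, prev, ws =>
      if j ≠ prev + 1 then pvBGroup rest j j (ws ++ [(run_start, prev)])
      else pvBGroup rest run_start j ws

def find_anom_subsequences_alt (labels : List Int) : List (Int × Int) :=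
  match pvBFilter labels 0 with
  | [] => []
  | j :: rest => pvBGroup rest j j []

-- ===== PRECONDITION & SPEC =====
def Spec_find_anom_subsequences (labels : List Int) (out : List (Int × Int)) : Prop := out = find_anom_subsequences_alt labels
instance (labels : List Int) (out : List (Int × Int)) : Decidable (Spec_find_anom_subsequences labels out) := by unfold Spec_find_anom_subsequences; infer_instance

-- ===== CLAIM (what is proved, stated in full; the proofs are below) =====
def Claim_equal_find_anom_subsequences : Prop := ∀ (labels : List Int), Dom_find_anom_subsequences labels → Spec_find_anom_subsequences labels (find_anom_subsequences labels)

-- ===== LEMMAS AND PROOFS =====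

-- finishing step of A: close the still-open window (if any) at index `last`
def pvFinish (r : List (Int × Int) × Option Int) (last : Int) : List (Int × Int) :=
  match r.2 with
  | some s => r.1 ++ [(s, last)]
  | none => r.1

lemma pvBFilter_ge : ∀ (l : List Int) (i x : Int), x ∈ pvBFilter l i → i ≤ x := by
  intro l
  induction l with
  | nil => intro i x h; simp [pvBFilter] at h
  | cons v rest ih =>
      intro i x h
      simp only [pvBFilter] at h
      by_cases hv : v == 1
      · simp [hv] at h
        rcases h with h | h
        · omega
        · have := ih (i + 1) x h; omega
      · simp [hv] at h
        have := ih (i + 1) x h; omega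

lemma pv_key : ∀ (l : List Int) (i : Int) (ws : List (Int × Int)),
    (∀ s, pvFinish (pvALoop l i ws (some s)) (i + (l.length : Int) - 1)
        = pvBGroup (pvBFilter l i) s (i - 1) ws)
    ∧ pvFinish (pvALoop l i ws none) (i + (l.length : Int) - 1)
        = (match pvBFilter l i with
           | [] => ws
           | j :: rest => pvBGroup rest j j ws) := by
  intro l
  induction l with
  | nil =>
      intro i ws
      constructor
      · intro s; simp [pvALoop, pvBFilter, pvBGroup, pvFinish]
      · simp [pvALoop, pvBFilter, pvFinish]
  | cons v rest ih =>
      intro i ws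
      have hlen : i + ((v :: rest).length : Int) - 1 = (i + 1) + (rest.length : Int) - 1 := by
        simp; omega
      constructor
      · intro s
        by_cases hv : v == 1
        · -- run continues: head of filter is i, and i = (i-1)+1 so group takes else branch
          have h1 : pvALoop (v :: rest) i ws (some s) = pvALoop rest (i + 1) ws (some s) := by
            simp [pvALoop, hv]
          have h2 : pvBFilter (v :: rest) i = i :: pvBFilter rest (i + 1) := by
            simp [pvBFilter, hv]
          rw [h1, h2, hlen, (ih (i + 1) ws).1 s]
          have : pvBGroup (i :: pvBFilter rest (i + 1)) s (i - 1) ws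
               = pvBGroup (pvBFilter rest (i + 1)) s i ws := by
            simp [pvBGroup]
          rw [this]
          have : (i + 1) - 1 = i := by omega
          rw [this]
        · -- window closes at i-1
          have h1 : pvALoop (v :: rest) i ws (some s)
              = pvALoop rest (i + 1) (ws ++ [(s, i - 1)]) none := by
            simp [pvALoop, hv]
          have h2 : pvBFilter (v :: rest) i = pvBFilter rest (i + 1) := by
            simp [pvBFilter, hv]
          rw [h1, h2, hlen, (ih (i + 1) (ws ++ [(s, i - 1)])).2]
          cases hf : pvBFilter rest (i + 1) with
          | nil => simp [pvBGroup]
          | cons j r =>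
              have hj : i + 1 ≤ j := pvBFilter_ge rest (i + 1) j (by rw [hf]; simp)
              have hne : j ≠ (i - 1) + 1 := by omega
              simp [pvBGroup, hne]
              intro h; exact absurd h (by omega)
      · by_cases hv : v == 1
        · have h1 : pvALoop (v :: rest) i ws none = pvALoop rest (i + 1) ws (some i) := by
            simp [pvALoop, hv]
          have h2 : pvBFilter (v :: rest) i = i :: pvBFilter rest (i + 1) := by
            simp [pvBFilter, hv]
          rw [h1, h2, hlen, (ih (i + 1) ws).1 i]
          have : (i + 1) - 1 = i := by omega
          rw [this]
        · have h1 : pvALoop (v :: rest) i ws none = pvALoop rest (i + 1) ws none := by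
            simp [pvALoop, hv]
          have h2 : pvBFilter (v :: rest) i = pvBFilter rest (i + 1) := by
            simp [pvBFilter, hv]
          rw [h1, h2, hlen, (ih (i + 1) ws).2]

-- ===== VERDICT (by name: the statement is the Claim_ definition above) =====
theorem find_anom_subsequences_spec : Claim_equal_find_anom_subsequences := by
  intro labels _
  unfold Spec_find_anom_subsequences
  have h := (pv_key labels 0 []).2
  have hL : find_anom_subsequences labels
      = pvFinish (pvALoop labels 0 [] none) (0 + (labels.length : Int) - 1) := by
    simp [find_anom_subsequences, pvFinish]
  rw [hL, h]
  unfold find_anom_subsequences_alt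
  cases pvBFilter labels 0 <;> rfl
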